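-- pv_equiv track=rewrite | github.com/vauxoo-dev/gist-vauxoo | generate_migration_issues.py | search_in_vauxoo_migrated_modules
-- ===== SOURCE A (Python) =====
-- def search_in_vauxoo_migrated_modules(migrated_modules, module):
--     module_url = None
--     was_migrated = None
--     for m_row in migrated_modules:
--         _, _, m_name, m_module_url, m_state, m_new_name, m_new_module_url = m_row
--         if module == m_name:
--             module_url, was_migrated = m_module_url, m_state == "True"
--         elif module == m_new_name:
--             module_url, was_migrated = m_new_module_url, m_state == "True"
--     return module_url, was_migrated
-- ===== SOURCE B (Python) =====
-- def search_in_vauxoo_migrated_modules(migrated_modules, module):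
--     for m_row in reversed(list(migrated_modules)):
--         _, _, m_name, m_module_url, m_state, m_new_name, m_new_module_url = m_row
--         if module == m_name:
--             return m_module_url, m_state == "True"
--         if module == m_new_name:
--             return m_new_module_url, m_state == "True"
--     return None, None
-- ===== Notes on version B (the rewrite author's own statement) =====
-- stated objective: alternative
-- what changed: Replaces the accumulate-the-last-match forward loop with a reversed scan that returns immediately on the first matching row (keeping the m_name-over-m_new_name priority within a row).
import Mathlib
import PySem

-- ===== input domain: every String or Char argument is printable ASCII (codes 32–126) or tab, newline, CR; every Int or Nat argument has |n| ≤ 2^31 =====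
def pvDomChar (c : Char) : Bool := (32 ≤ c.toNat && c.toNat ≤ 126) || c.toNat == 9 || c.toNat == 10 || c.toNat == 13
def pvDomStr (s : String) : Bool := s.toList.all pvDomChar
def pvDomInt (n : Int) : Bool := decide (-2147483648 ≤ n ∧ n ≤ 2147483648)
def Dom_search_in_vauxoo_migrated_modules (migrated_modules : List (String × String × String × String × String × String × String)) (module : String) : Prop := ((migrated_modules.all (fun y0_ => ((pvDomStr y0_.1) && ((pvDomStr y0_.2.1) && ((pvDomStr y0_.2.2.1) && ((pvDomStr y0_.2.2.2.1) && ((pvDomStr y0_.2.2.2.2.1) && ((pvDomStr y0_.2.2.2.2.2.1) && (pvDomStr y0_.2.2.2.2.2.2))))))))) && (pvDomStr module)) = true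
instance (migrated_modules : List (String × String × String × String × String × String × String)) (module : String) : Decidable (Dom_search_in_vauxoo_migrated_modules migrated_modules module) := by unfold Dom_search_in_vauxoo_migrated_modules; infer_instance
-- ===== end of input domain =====

-- B scans the rows in reverse and returns at the first match instead of accumulating the last match (alternative decomposition, same O(n) cost).


-- ===== PORT A =====
def search_in_vauxoo_migrated_modules (migrated_modules : List (String × String × String × String × String × String × String)) (module : String) : Option String × Option Bool :=
  migrated_modules.foldl
    (fun st m_row =>
      let m_name := m_row.2.2.1
      let m_module_url := m_row.2.2.2.1
      let m_state := m_row.2.2.2.2.1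
      let m_new_name := m_row.2.2.2.2.2.1
      let m_new_module_url := m_row.2.2.2.2.2.2
      if module == m_name then (some m_module_url, some (m_state == "True"))
      else if module == m_new_name then (some m_new_module_url, some (m_state == "True"))
      else st)
    (none, none)

-- ===== PORT B =====
-- helper: scan the (already reversed) rows, first match wins
def pvAltFind (module : String) : List (String × String × String × String × String × String × String) → Option (String × Bool)
  | [] => none
  | m_row :: rest =>
      let m_name := m_row.2.2.1
      let m_module_url := m_row.2.2.2.1
      let m_state := m_row.2.2.2.2.1
      let m_new_name := m_row.2.2.2.2.2.1
      let m_new_module_url := m_row.2.2.2.2.2.2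
      if module == m_name then some (m_module_url, m_state == "True")
      else if module == m_new_name then some (m_new_module_url, m_state == "True")
      else pvAltFind module rest

def search_in_vauxoo_migrated_modules_alt (migrated_modules : List (String × String × String × String × String × String × String)) (module : String) : Option String × Option Bool :=
  match pvAltFind module migrated_modules.reverse with
  | some (u, w) => (some u, some w)
  | none => (none, none)

-- ===== PRECONDITION & SPEC =====
def Spec_search_in_vauxoo_migrated_modules (migrated_modules : List (String × String × String × String × String × String × String)) (module : String) (out : Option String × Option Bool) : Prop := out = search_in_vauxoo_migrated_modules_alt migrated_modules module
instance (migrated_modules : List (String × String × String × String × String × String × String)) (module : String) (out : Option String × Option Bool) : Decidable (Spec_search_in_vauxoo_migrated_modules migrated_modules module out) := by unfold Spec_search_in_vauxoo_migrated_modules; infer_instance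

-- ===== CLAIM (what is proved, stated in full; the proofs are below) =====
def Claim_equal_search_in_vauxoo_migrated_modules : Prop := ∀ (migrated_modules : List (String × String × String × String × String × String × String)) (module : String), Dom_search_in_vauxoo_migrated_modules migrated_modules module → Spec_search_in_vauxoo_migrated_modules migrated_modules module (search_in_vauxoo_migrated_modules migrated_modules module)

-- ===== LEMMAS AND PROOFS =====

-- ===== VERDICT (by name: the statement is the Claim_ definition above) =====
lemma pv_foldl_eq_find (module : String) (l : List (String × String × String × String × String × String × String)) :
    l.foldl
      (fun st m_row =>
        let m_name := m_row.2.2.1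
        let m_module_url := m_row.2.2.2.1
        let m_state := m_row.2.2.2.2.1
        let m_new_name := m_row.2.2.2.2.2.1
        let m_new_module_url := m_row.2.2.2.2.2.2
        if module == m_name then (some m_module_url, some (m_state == "True"))
        else if module == m_new_name then (some m_new_module_url, some (m_state == "True"))
        else st)
      ((none : Option String), (none : Option Bool))
    = (match pvAltFind module l.reverse with
       | some (u, w) => (some u, some w)
       | none => ((none : Option String), (none : Option Bool))) := by
  induction l using List.reverseRecOn with
  | nil => simp [pvAltFind]
  | append_singleton l x ih =>
      simp only [List.foldl_append, List.foldl_cons, List.foldl_nil, List.reverse_append,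
        List.reverse_singleton, List.singleton_append, pvAltFind]
      by_cases h1 : module == x.2.2.1
      · simp [h1]
      · by_cases h2 : module == x.2.2.2.2.2.1
        · simp [h1, h2]
        · simp only [h1, h2, if_false]
          exact ih

theorem search_in_vauxoo_migrated_modules_spec : Claim_equal_search_in_vauxoo_migrated_modules := by
  intro mm module _
  unfold Spec_search_in_vauxoo_migrated_modules search_in_vauxoo_migrated_modules search_in_vauxoo_migrated_modules_alt
  exact pv_foldl_eq_find module mm
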